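-- pv_equiv track=rewrite | github.com/BOUN-TABILab-TULAP/Sentence-Splitter | bap_sentence_splitter.py | _char_to_token
-- ===== SOURCE A (Python) =====
-- def _char_to_token(samplesent, _sentence_tag_list):
--     token_list = []
--     token = []
--     for j in range(len(_sentence_tag_list[0])): #for each character of a sentence
--         ch = _sentence_tag_list[0][j]
--         ach = samplesent[j]
--
--         if ch == 'N':
--           token.append(ach)
--
--
--         else:
--           if ch =='S':
--             token.append(ach)
--             token_list.append(token)
--             token=[]
--
--
--     return token_list
-- ===== SOURCE B (Python) =====
-- def _char_to_token(samplesent, _sentence_tag_list):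
--     tags = _sentence_tag_list[0]
--     boundaries = [j for j, t in enumerate(tags) if t == 'S']
--     token_list = []
--     prev = 0
--     for p in boundaries:
--         token_list.append([samplesent[k] for k in range(prev, p + 1)
--                            if tags[k] == 'N' or tags[k] == 'S'])
--         prev = p + 1
--     return token_list
-- ===== Notes on version B (the rewrite author's own statement) =====
-- stated objective: alternative
-- what changed: Instead of one running accumulator flushed on each 'S' tag, B first collects the list of 'S' boundary indices and then builds each token as a filtered slice of the segment between consecutive boundaries.
import Mathlib
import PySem

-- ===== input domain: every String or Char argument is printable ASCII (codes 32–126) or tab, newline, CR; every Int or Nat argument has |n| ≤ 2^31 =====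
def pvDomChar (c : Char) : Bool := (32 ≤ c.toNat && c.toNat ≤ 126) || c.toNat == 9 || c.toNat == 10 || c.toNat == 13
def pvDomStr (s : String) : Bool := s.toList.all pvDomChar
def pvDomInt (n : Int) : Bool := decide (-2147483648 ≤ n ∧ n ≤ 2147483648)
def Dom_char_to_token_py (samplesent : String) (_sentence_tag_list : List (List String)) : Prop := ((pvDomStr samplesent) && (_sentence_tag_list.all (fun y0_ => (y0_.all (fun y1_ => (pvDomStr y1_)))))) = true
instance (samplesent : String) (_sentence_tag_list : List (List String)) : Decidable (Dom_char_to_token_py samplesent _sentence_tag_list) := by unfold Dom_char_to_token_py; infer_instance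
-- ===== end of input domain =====

-- B replaces A's running accumulator (flushed at each 'S') by a precomputed list of 'S'
-- boundary indices followed by a segment-wise slicing pass ("alternative" objective; same O(n) cost).

-- ===== PORT A =====
def char_to_token_py (samplesent : String) (_sentence_tag_list : List (List String)) : List (List String) :=
  ((List.range (_sentence_tag_list.headD []).length).foldl
      (fun (st : List (List String) × List String) j =>
        if (_sentence_tag_list.headD []).getD j "" = "N" then
          (st.1, st.2 ++ [String.singleton (samplesent.toList.getD j ' ')])
        else if (_sentence_tag_list.headD []).getD j "" = "S" then
          (st.1 ++ [st.2 ++ [String.singleton (samplesent.toList.getD j ' ')]], [])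
        else st)
      ([], [])).1

-- ===== PORT B =====
def char_to_token_py_alt (samplesent : String) (_sentence_tag_list : List (List String)) : List (List String) :=
  ((((PySem.List.enumerate (_sentence_tag_list.headD [])).filter (fun p => p.2 == "S")).map (fun p => p.1)).foldl
      (fun (st : List (List String) × Int) p =>
        (st.1 ++ [((PySem.List.pyRange st.2 (p + 1) 1).filter
              (fun k => PySem.List.pyGetD (_sentence_tag_list.headD []) k "" == "N"
                || PySem.List.pyGetD (_sentence_tag_list.headD []) k "" == "S")).map
            (fun k => String.singleton (PySem.List.pyGetD samplesent.toList k ' '))], p + 1))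
      ([], 0)).1

-- ===== PRECONDITION & SPEC =====
-- Pre_ excludes exactly the inputs where A raises: an empty outer list (IndexError on
-- _sentence_tag_list[0]) and a tag row longer than the sentence (IndexError on samplesent[j]).
def Pre_char_to_token_py (samplesent : String) (_sentence_tag_list : List (List String)) : Prop :=
  _sentence_tag_list ≠ [] ∧ (_sentence_tag_list.headD []).length ≤ samplesent.toList.length
instance (samplesent : String) (_sentence_tag_list : List (List String)) : Decidable (Pre_char_to_token_py samplesent _sentence_tag_list) := by unfold Pre_char_to_token_py; infer_instance

def pvWitness_char_to_token_py : String × List (List String) := ("ab.", [["N", "S", "O"]])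

def Spec_char_to_token_py (samplesent : String) (_sentence_tag_list : List (List String)) (out : List (List String)) : Prop := out = char_to_token_py_alt samplesent _sentence_tag_list
instance (samplesent : String) (_sentence_tag_list : List (List String)) (out : List (List String)) : Decidable (Spec_char_to_token_py samplesent _sentence_tag_list out) := by unfold Spec_char_to_token_py; infer_instance

-- ===== CLAIM (what is proved, stated in full; the proofs are below) =====
def Claim_equal_char_to_token_py : Prop := ∀ (samplesent : String) (_sentence_tag_list : List (List String)), Dom_char_to_token_py samplesent _sentence_tag_list → Pre_char_to_token_py samplesent _sentence_tag_list → Spec_char_to_token_py samplesent _sentence_tag_list (char_to_token_py samplesent _sentence_tag_list)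


-- ===== LEMMAS AND PROOFS =====

-- Common specification: structural recursion over (tags, chars) with the pending token.
def ctSpec : List String → List Char → List String → List (List String)
  | [], _, _ => []
  | _ :: _, [], _ => []
  | t :: ts, c :: cs, tok =>
    if t = "N" then ctSpec ts cs (tok ++ [String.singleton c])
    else if t = "S" then (tok ++ [String.singleton c]) :: ctSpec ts cs []
    else ctSpec ts cs tok

-- A's loop body, parametrised by the two lists.
def ctStep (tags : List String) (cs : List Char) (st : List (List String) × List String) (j : Nat) :
    List (List String) × List String :=
  if tags.getD j "" = "N" then (st.1, st.2 ++ [String.singleton (cs.getD j ' ')])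
  else if tags.getD j "" = "S" then (st.1 ++ [st.2 ++ [String.singleton (cs.getD j ' ')]], [])
  else st

lemma foldA_eq : ∀ (ts : List String) (cs : List Char) (tl : List (List String)) (tok : List String),
    ts.length ≤ cs.length →
    ((List.range ts.length).foldl (ctStep ts cs) (tl, tok)).1 = tl ++ ctSpec ts cs tok := by
  intro ts
  induction ts with
  | nil => intro cs tl tok _; simp [ctSpec]
  | cons t ts ih =>
    intro cs tl tok h
    match cs with
    | [] => simp at h
    | c :: cs =>
      rw [List.length_cons, List.range_succ_eq_map]
      rw [List.foldl_cons, List.foldl_map]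
      have hfun : (fun (st : List (List String) × List String) (j : Nat) =>
          ctStep (t :: ts) (c :: cs) st (j + 1)) = ctStep ts cs := by
        funext st j; simp [ctStep]
      rw [show (fun (st : List (List String) × List String) j =>
          ctStep (t :: ts) (c :: cs) st j.succ) = ctStep ts cs from hfun]
      have h' : ts.length ≤ cs.length := by simpa using h
      simp only [ctStep, ctSpec, List.getD_cons_zero]
      by_cases hN : t = "N"
      · subst hN
        simp only [String.reduceEq, reduceIte]
        rw [ih cs tl (tok ++ [String.singleton c]) h']
      · by_cases hS : t = "S"
        · subst hS
          simp only [String.reduceEq, reduceIte]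
          rw [ih cs (tl ++ [tok ++ [String.singleton c]]) [] h']
          simp
        · simp only [if_neg hN, if_neg hS]
          rw [ih cs tl tok h']

-- B-side natural-number model.
def segN (tags : List String) (cs : List Char) (a b : Nat) : List String :=
  ((List.range' a (b - a)).filter
      (fun k => tags.getD k "" == "N" || tags.getD k "" == "S")).map
    (fun k => String.singleton (cs.getD k ' '))

def bndsN : List String → List Nat
  | [] => []
  | t :: ts => (if t = "S" then [0] else []) ++ (bndsN ts).map (· + 1)

def stepN (tags : List String) (cs : List Char) (st : List (List String) × Nat) (p : Nat) :
    List (List String) × Nat :=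
  (st.1 ++ [segN tags cs st.2 (p + 1)], p + 1)

lemma range'_shift (a n : Nat) : List.range' (a + 1) n = (List.range' a n).map (· + 1) := by
  have h := List.map_add_range' (a := 1) a n 1
  rw [show a + 1 = 1 + a from Nat.add_comm a 1, ← h]
  exact List.map_congr_left fun x _ => Nat.add_comm 1 x

lemma segN_shift (t : String) (c : Char) (ts : List String) (cs : List Char) (a b : Nat) :
    segN (t :: ts) (c :: cs) (a + 1) (b + 1) = segN ts cs a b := by
  simp [segN, Nat.add_sub_add_right, range'_shift, List.filter_map, List.map_map,
    Function.comp_def, List.getElem?_cons_succ]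

lemma segN_head (t : String) (c : Char) (ts : List String) (cs : List Char) (b : Nat) :
    segN (t :: ts) (c :: cs) 0 (b + 1)
      = (if t == "N" || t == "S" then [String.singleton c] else []) ++ segN ts cs 0 b := by
  rw [segN, Nat.sub_zero, List.range'_succ, List.filter_cons]
  have h1 : List.range' (0 + 1) b = (List.range' 0 b).map (· + 1) := range'_shift 0 b
  simp only [List.getD_cons_zero]
  by_cases hN : (t == "N" || t == "S") = true
  · rw [if_pos hN, if_pos hN, List.map_cons]
    simp [h1, List.filter_map, List.map_map, Function.comp_def, segN, List.getElem?_cons_succ]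
  · rw [if_neg hN, if_neg hN, List.nil_append]
    simp [h1, List.filter_map, List.map_map, Function.comp_def, segN, List.getElem?_cons_succ]

lemma foldN_shift : ∀ (bs : List Nat) (t : String) (c : Char) (ts : List String) (cs : List Char)
    (out : List (List String)) (a : Nat),
    (bs.map (· + 1)).foldl (stepN (t :: ts) (c :: cs)) (out, a + 1)
      = ((bs.foldl (stepN ts cs) (out, a)).1, (bs.foldl (stepN ts cs) (out, a)).2 + 1) := by
  intro bs
  induction bs with
  | nil => intro t c ts cs out a; simp
  | cons p bs ih =>
    intro t c ts cs out a
    rw [List.map_cons, List.foldl_cons, List.foldl_cons]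
    show (bs.map (· + 1)).foldl (stepN (t :: ts) (c :: cs))
        (out ++ [segN (t :: ts) (c :: cs) (a + 1) (p + 1 + 1)], p + 1 + 1) = _
    rw [segN_shift]
    exact ih t c ts cs (out ++ [segN ts cs a (p + 1)]) (p + 1)

lemma foldN_shift_fst (bs : List Nat) (t : String) (c : Char) (ts : List String) (cs : List Char)
    (out : List (List String)) (a : Nat) :
    ((bs.map (· + 1)).foldl (stepN (t :: ts) (c :: cs)) (out, a + 1)).1
      = (bs.foldl (stepN ts cs) (out, a)).1 := by
  rw [foldN_shift]

lemma ctSpec_nil_of_noS : ∀ (ts : List String) (cs : List Char) (tok : List String),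
    bndsN ts = [] → ctSpec ts cs tok = [] := by
  intro ts
  induction ts with
  | nil => intro cs tok _; rfl
  | cons t ts ih =>
    intro cs tok h
    rw [bndsN] at h
    have hS : ¬ t = "S" := by
      intro hs; rw [if_pos hs] at h; simp at h
    rw [if_neg hS] at h
    simp only [List.nil_append, List.map_eq_nil_iff] at h
    match cs with
    | [] => rfl
    | c :: cs =>
      rw [ctSpec]
      by_cases hN : t = "N"
      · rw [if_pos hN]; exact ih cs _ h
      · rw [if_neg hN, if_neg hS]; exact ih cs _ h

-- The fold with the FIRST boundary's segment prefixed by a pending token.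
def foldFirst (tags : List String) (cs : List Char) (out : List (List String)) (tok : List String) :
    List Nat → List (List String)
  | [] => out
  | p :: bs => (bs.foldl (stepN tags cs) (out ++ [tok ++ segN tags cs 0 (p + 1)], p + 1)).1

lemma plainFold_eq_foldFirst (ts : List String) (cs : List Char) (bs : List Nat)
    (out : List (List String)) :
    (bs.foldl (stepN ts cs) (out, 0)).1 = foldFirst ts cs out [] bs := by
  cases bs with
  | nil => rfl
  | cons p bs => rw [List.foldl_cons, foldFirst]; rfl

lemma foldFirst_eq : ∀ (ts : List String) (cs : List Char) (tok : List String)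
    (out : List (List String)), ts.length ≤ cs.length →
    foldFirst ts cs out tok (bndsN ts) = out ++ ctSpec ts cs tok := by
  intro ts
  induction ts with
  | nil => intro cs tok out _; simp [bndsN, foldFirst, ctSpec]
  | cons t ts ih =>
    intro cs tok out h
    match cs with
    | [] => simp at h
    | c :: cs =>
      have h' : ts.length ≤ cs.length := by simpa using h
      rw [bndsN]
      by_cases hS : t = "S"
      · rw [if_pos hS, List.singleton_append, foldFirst, foldN_shift_fst,
            plainFold_eq_foldFirst, ih cs [] _ h']
        have hseg : segN (t :: ts) (c :: cs) 0 (0 + 1)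
            = (if t == "N" || t == "S" then [String.singleton c] else []) ++ segN ts cs 0 0 := by
          exact segN_head t c ts cs 0
        rw [hseg]
        have : (if t == "N" || t == "S" then [String.singleton c] else []) = [String.singleton c] := by
          simp [hS]
        rw [this]
        rw [ctSpec, if_neg (by simp [hS]), if_pos hS]
        simp [segN]
      · rw [if_neg hS, List.nil_append]
        cases hbs : bndsN ts with
        | nil =>
          rw [List.map_nil, foldFirst]
          have hnil : ctSpec (t :: ts) (c :: cs) tok = [] := by
            rw [ctSpec]
            by_cases hN : t = "N"
            · rw [if_pos hN]; exact ctSpec_nil_of_noS ts cs _ hbs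
            · rw [if_neg hN, if_neg hS]; exact ctSpec_nil_of_noS ts cs _ hbs
          rw [hnil, List.append_nil]
        | cons p bs =>
          rw [List.map_cons, foldFirst, segN_head, foldN_shift_fst]
          rw [show out ++ [tok ++ ((if t == "N" || t == "S" then [String.singleton c] else [])
                ++ segN ts cs 0 (p + 1))]
              = out ++ [(tok ++ (if t == "N" || t == "S" then [String.singleton c] else []))
                ++ segN ts cs 0 (p + 1)] by simp]
          have hmain := ih cs (tok ++ (if t == "N" || t == "S" then [String.singleton c] else []))
            out h'
          rw [hbs] at hmain
          rw [show (bs.foldl (stepN ts cs)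
                (out ++ [(tok ++ (if t == "N" || t == "S" then [String.singleton c] else []))
                  ++ segN ts cs 0 (p + 1)], p + 1)).1
              = foldFirst ts cs out
                  (tok ++ (if t == "N" || t == "S" then [String.singleton c] else [])) (p :: bs)
            from rfl]
          rw [hmain, ctSpec]
          by_cases hN : t = "N"
          · rw [if_pos hN]
            have : (if t == "N" || t == "S" then [String.singleton c] else [])
                = [String.singleton c] := by simp [hN]
            rw [this]
          · rw [if_neg hN, if_neg hS]
            have : (if t == "N" || t == "S" then [String.singleton c] else []) = [] := by
              simp [hN, hS]
            rw [this, List.append_nil]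

-- Bridges from the PySem Int port of B to the Nat model.
lemma enum_bnds : ∀ (ts : List String) (s : Int),
    ((PySem.List.enumerate ts s).filter (fun p => p.2 == "S")).map (fun p => p.1)
      = List.map (fun n : Nat => s + (n : Int)) (bndsN ts) := by
  intro ts
  induction ts with
  | nil => intro s; simp [PySem.List.enumerate_nil, bndsN]
  | cons t ts ih =>
    intro s
    rw [PySem.List.enumerate_cons, List.filter_cons, bndsN]
    by_cases hS : t = "S"
    · rw [if_pos (by simp [hS]), if_pos hS, List.singleton_append, List.map_cons, List.map_cons,
        ih (s + 1), List.map_map]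
      refine congrArg₂ List.cons (by simp) (List.map_congr_left fun n _ => ?_)
      simp only [Function.comp_apply]
      push_cast
      ring
    · rw [if_neg (by simp [hS]), if_neg hS, List.nil_append, ih (s + 1), List.map_map]
      exact List.map_congr_left fun n _ => by
        simp only [Function.comp_apply]
        push_cast
        ring

lemma segI_eq_segN (tags : List String) (cs : List Char) (a b : Nat) :
    ((PySem.List.pyRange (a : Int) (b : Int) 1).filter
        (fun k => PySem.List.pyGetD tags k "" == "N" || PySem.List.pyGetD tags k "" == "S")).map
      (fun k => String.singleton (PySem.List.pyGetD cs k ' ')) = segN tags cs a b := by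
  have hab : ((b : Int) - (a : Int)).toNat = b - a := by omega
  rw [PySem.List.pyRange_one, hab, segN, List.range'_eq_map_range,
      List.filter_map, List.filter_map, List.map_map, List.map_map]
  have : ∀ (k : Nat), (a : Int) + (k : Int) = ((a + k : Nat) : Int) := by intro k; push_cast; ring
  simp only [Function.comp_def, this, PySem.List.pyGetD_natCast]

lemma foldI_eq_foldN : ∀ (bs : List Nat) (tags : List String) (cs : List Char)
    (out : List (List String)) (a : Nat),
    ((bs.map (fun n : Nat => (n : Int))).foldl
        (fun (st : List (List String) × Int) p =>
          (st.1 ++ [((PySem.List.pyRange st.2 (p + 1) 1).filter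
                (fun k => PySem.List.pyGetD tags k "" == "N"
                  || PySem.List.pyGetD tags k "" == "S")).map
              (fun k => String.singleton (PySem.List.pyGetD cs k ' '))], p + 1))
        (out, (a : Int))).1
      = (bs.foldl (stepN tags cs) (out, a)).1 := by
  intro bs
  induction bs with
  | nil => intro tags cs out a; simp
  | cons p bs ih =>
    intro tags cs out a
    rw [List.map_cons, List.foldl_cons, List.foldl_cons]
    have hp1 : ((p : Int) + 1) = ((p + 1 : Nat) : Int) := by push_cast; ring
    rw [hp1, segI_eq_segN tags cs a (p + 1)]
    exact ih tags cs (out ++ [segN tags cs a (p + 1)]) (p + 1)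

-- ===== VERDICT (by name: the statement is the Claim_ definition above) =====
theorem char_to_token_py_spec : Claim_equal_char_to_token_py := by
  intro s l _ hpre
  obtain ⟨h1, h2⟩ := hpre
  unfold Spec_char_to_token_py char_to_token_py char_to_token_py_alt
  rw [show (fun (st : List (List String) × List String) j =>
        if (l.headD []).getD j "" = "N" then
          (st.1, st.2 ++ [String.singleton (s.toList.getD j ' ')])
        else if (l.headD []).getD j "" = "S" then
          (st.1 ++ [st.2 ++ [String.singleton (s.toList.getD j ' ')]], ([] : List String))
        else st) = ctStep (l.headD []) s.toList from rfl]
  rw [foldA_eq _ _ _ _ h2, enum_bnds (l.headD []) 0]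
  rw [show List.map (fun n : Nat => (0 : Int) + (n : Int)) (bndsN (l.headD []))
      = List.map (fun n : Nat => (n : Int)) (bndsN (l.headD [])) from
    List.map_congr_left fun n _ => zero_add _]
  rw [show ((0 : Int)) = ((0 : Nat) : Int) from rfl]
  rw [foldI_eq_foldN (bndsN (l.headD [])) (l.headD []) s.toList [] 0]
  rw [plainFold_eq_foldFirst, foldFirst_eq _ _ _ _ h2]
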